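-- pv_equiv track=rewrite | github.com/Brandonalan70/NBA_Prediction_Model | data_clean_vscode.py | find_slot
-- ===== SOURCE A (Python) =====
-- def find_slot(current_five, target_first, target_last):
--     """
--     Find the index in current_five matching (first,last) primarily,
--     else by last name, else return None.
--     current_five is a list of dicts: {'FIRST_NAME','LAST_NAME',...}
--     """
--     # exact first+last
--     for i, p in enumerate(current_five):
--         if (p['FIRST_NAME'] and target_first and p['FIRST_NAME'].lower() == str(target_first).lower()
--             and p['LAST_NAME'] and target_last and p['LAST_NAME'].lower() == str(target_last).lower()):
--             return i
--     # fallback: last name only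
--     for i, p in enumerate(current_five):
--         if p['LAST_NAME'] and target_last and p['LAST_NAME'].lower() == str(target_last).lower():
--             return i
--     return None
-- ===== SOURCE B (Python) =====
-- def find_slot(current_five, target_first, target_last):
--     """Score each slot (2 = exact first+last match, 1 = last-name-only match,
--     0 = no match), then return the index of the first best-scoring slot,
--     or None when nothing matches."""
--     def score(p):
--         first_ok = bool(p['FIRST_NAME']) and bool(target_first) and p['FIRST_NAME'].lower() == str(target_first).lower()
--         last_ok = bool(p['LAST_NAME']) and bool(target_last) and p['LAST_NAME'].lower() == str(target_last).lower()
--         return 2 if first_ok and last_ok else (1 if last_ok else 0)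
--     scores = [score(p) for p in current_five]
--     best = max(scores, default=0)
--     return scores.index(best) if best else None
-- ===== Notes on version B (the rewrite author's own statement) =====
-- stated objective: alternative
-- what changed: A's two staged enumerate scans with early returns are replaced by a score-and-argmax formulation: each slot is mapped to a match score (2 exact, 1 last-name-only, 0 none), and the answer is the index of the first maximal score, or None when the maximum is 0.
-- outside the precondition, e.g. on find_slot([{'FIRST_NAME': 'a', 'LAST_NAME': 'b'}, {}], 'a', 'b'): A returns 0, B raises KeyError
import Mathlib
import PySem

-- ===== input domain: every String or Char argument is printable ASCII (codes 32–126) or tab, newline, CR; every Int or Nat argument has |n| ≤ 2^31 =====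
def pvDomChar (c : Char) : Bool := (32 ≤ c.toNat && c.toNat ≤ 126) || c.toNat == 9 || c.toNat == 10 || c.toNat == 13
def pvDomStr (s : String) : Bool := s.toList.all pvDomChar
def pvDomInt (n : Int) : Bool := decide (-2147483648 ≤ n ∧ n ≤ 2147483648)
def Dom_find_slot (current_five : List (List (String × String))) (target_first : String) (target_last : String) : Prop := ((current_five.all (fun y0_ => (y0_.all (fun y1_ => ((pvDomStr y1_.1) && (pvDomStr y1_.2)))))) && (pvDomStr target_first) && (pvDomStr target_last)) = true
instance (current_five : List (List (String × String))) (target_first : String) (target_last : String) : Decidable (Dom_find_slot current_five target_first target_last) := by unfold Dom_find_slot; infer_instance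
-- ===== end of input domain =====

-- B replaces A's two staged scans by a score-and-argmax formulation: map each slot to a
-- match score (2 exact, 1 last-name-only, 0 none) and return the index of the first
-- maximal score, or none when the maximum is 0; same cost, different algorithm.


-- ===== PORT A =====
-- p[k]: exact under Pre_find_slot, which guarantees the key is present (Python raises KeyError otherwise)
def pvGet (p : List (String × String)) (k : String) : String := ((PySem.Dict.mk p).get? k).getD ""

-- the exact first+last condition of A's first scan (operand order preserved)
def pvExact (target_first target_last : String) (p : List (String × String)) : Bool :=
  (pvGet p "FIRST_NAME" != "") && (target_first != "") &&
  (PySem.Str.lower (pvGet p "FIRST_NAME") == PySem.Str.lower target_first) &&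
  (pvGet p "LAST_NAME" != "") && (target_last != "") &&
  (PySem.Str.lower (pvGet p "LAST_NAME") == PySem.Str.lower target_last)

-- the last-name-only condition of A's second scan
def pvLastOnly (target_last : String) (p : List (String × String)) : Bool :=
  (pvGet p "LAST_NAME" != "") && (target_last != "") &&
  (PySem.Str.lower (pvGet p "LAST_NAME") == PySem.Str.lower target_last)

-- A's first loop: first index with the exact condition
def pvScanExact (target_first target_last : String) : List (List (String × String)) → Int → Option Int
  | [], _ => none
  | p :: rest, i => if pvExact target_first target_last p then some i
                    else pvScanExact target_first target_last rest (i + 1)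

-- A's second loop: first index with the last-name condition
def pvScanLast (target_last : String) : List (List (String × String)) → Int → Option Int
  | [], _ => none
  | p :: rest, i => if pvLastOnly target_last p then some i
                    else pvScanLast target_last rest (i + 1)

def find_slot (current_five : List (List (String × String))) (target_first : String) (target_last : String) : Option Int :=
  match pvScanExact target_first target_last current_five 0 with
  | some i => some i
  | none => pvScanLast target_last current_five 0

-- ===== PORT B =====
-- B's score(p): 2 for an exact first+last match, 1 for a last-name-only match, 0 otherwise
def pvScore (target_first target_last : String) (p : List (String × String)) : Int :=
  let first_ok := (pvGet p "FIRST_NAME" != "") && (target_first != "") &&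
    (PySem.Str.lower (pvGet p "FIRST_NAME") == PySem.Str.lower target_first)
  let last_ok := (pvGet p "LAST_NAME" != "") && (target_last != "") &&
    (PySem.Str.lower (pvGet p "LAST_NAME") == PySem.Str.lower target_last)
  if first_ok && last_ok then 2 else if last_ok then 1 else 0

def find_slot_alt (current_five : List (List (String × String))) (target_first : String) (target_last : String) : Option Int :=
  let scores := current_five.map (pvScore target_first target_last)
  let best := PySem.List.maxD scores (fun y => y) 0        -- max(scores, default=0)
  if best != 0 then (PySem.List.index? scores best).map (fun n => (n : Int)) else none

-- ===== PRECONDITION & SPEC =====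
-- Pre_ requires every dict to carry both keys: without them A raises KeyError, except when an
-- earlier match returns before the malformed dict's key is touched — there A's value is an
-- accident of scan position (and B scores every slot before answering, so it raises where A
-- may still return); all missing-key inputs are excluded.
def Pre_find_slot (current_five : List (List (String × String))) (target_first : String) (target_last : String) : Prop :=
  ∀ p ∈ current_five, ((PySem.Dict.mk p).get? "FIRST_NAME").isSome ∧ ((PySem.Dict.mk p).get? "LAST_NAME").isSome
instance (current_five : List (List (String × String))) (target_first : String) (target_last : String) : Decidable (Pre_find_slot current_five target_first target_last) := by unfold Pre_find_slot; infer_instance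

def pvWitness_find_slot : (List (List (String × String))) × String × String :=
  ([[("FIRST_NAME", "LeBron"), ("LAST_NAME", "James")], [("FIRST_NAME", "Stephen"), ("LAST_NAME", "Curry")]], "stephen", "CURRY")

def Spec_find_slot (current_five : List (List (String × String))) (target_first : String) (target_last : String) (out : Option Int) : Prop := out = find_slot_alt current_five target_first target_last
instance (current_five : List (List (String × String))) (target_first : String) (target_last : String) (out : Option Int) : Decidable (Spec_find_slot current_five target_first target_last out) := by unfold Spec_find_slot; infer_instance

-- ===== CLAIM (what is proved, stated in full; the proofs are below) =====
def Claim_equal_find_slot : Prop := ∀ (current_five : List (List (String × String))) (target_first : String) (target_last : String), Dom_find_slot current_five target_first target_last → Pre_find_slot current_five target_first target_last → Spec_find_slot current_five target_first target_last (find_slot current_five target_first target_last)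

-- ===== LEMMAS AND PROOFS =====
-- B's score as a case split on A's two scan conditions
lemma pvScore_eq (tf tl : String) (p : List (String × String)) :
    pvScore tf tl p = if pvExact tf tl p then 2 else if pvLastOnly tl p then 1 else 0 := by
  simp only [pvScore, pvExact, pvLastOnly, Bool.and_assoc]

-- A's scans are findIdx? with an index offset
lemma pvScanExact_eq (tf tl : String) (l : List (List (String × String))) (i : Int) :
    pvScanExact tf tl l i = (l.findIdx? (pvExact tf tl)).map (fun n => i + (n : Int)) := by
  induction l generalizing i with
  | nil => simp [pvScanExact]
  | cons p rest ih =>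
    simp only [pvScanExact, List.findIdx?_cons]
    by_cases h : pvExact tf tl p
    · simp [h]
    · simp only [h, Bool.false_eq_true, if_false, ih]
      cases rest.findIdx? (pvExact tf tl) with
      | none => simp
      | some n => simp; ring

lemma pvScanLast_eq (tl : String) (l : List (List (String × String))) (i : Int) :
    pvScanLast tl l i = (l.findIdx? (pvLastOnly tl)).map (fun n => i + (n : Int)) := by
  induction l generalizing i with
  | nil => simp [pvScanLast]
  | cons p rest ih =>
    simp only [pvScanLast, List.findIdx?_cons]
    by_cases h : pvLastOnly tl p
    · simp [h]
    · simp only [h, Bool.false_eq_true, if_false, ih]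
      cases rest.findIdx? (pvLastOnly tl) with
      | none => simp
      | some n => simp; ring

-- findIdx? only depends on the predicate's values on the list's members
lemma findIdx?_congr_mem {α : Type} (f g : α → Bool) (l : List α)
    (h : ∀ x ∈ l, f x = g x) : l.findIdx? f = l.findIdx? g := by
  induction l with
  | nil => rfl
  | cons x t ih =>
    simp only [List.findIdx?_cons, h x (by simp), ih (fun y hy => h y (by simp [hy]))]

-- the maximum of a list is v when v is a member and an upper bound
lemma max?_of_mem_of_ub (xs : List Int) (v : Int) (hv : v ∈ xs)
    (hub : ∀ y ∈ xs, y ≤ v) : PySem.List.max? xs (fun y => y) = some v := by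
  cases hm : PySem.List.max? xs (fun y => y) with
  | none => rw [PySem.List.max?_eq_none_iff] at hm; simp [hm] at hv
  | some m =>
    have h1 : m ≤ v := hub m (PySem.List.max?_mem hm)
    have h2 : v ≤ m := PySem.List.max?_isMax hm v hv
    rw [le_antisymm h1 h2]

-- find_slot_alt with its local bindings zeta-reduced
lemma find_slot_alt_def (cf : List (List (String × String))) (tf tl : String) :
    find_slot_alt cf tf tl =
      (if (PySem.List.maxD (cf.map (pvScore tf tl)) (fun y => y) 0) != 0
       then (PySem.List.index? (cf.map (pvScore tf tl))
              (PySem.List.maxD (cf.map (pvScore tf tl)) (fun y => y) 0)).map (fun n => (n : Int))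
       else none) := rfl

-- ===== VERDICT (by name: the statement is the Claim_ definition above) =====
theorem find_slot_spec : Claim_equal_find_slot := by
  intro cf tf tl _ _
  unfold Spec_find_slot find_slot
  rw [find_slot_alt_def, pvScanExact_eq, pvScanLast_eq]
  have hmap : cf.map (pvScore tf tl) =
      cf.map (fun p => if pvExact tf tl p then 2 else if pvLastOnly tl p then 1 else 0) :=
    List.map_congr_left (fun p _ => pvScore_eq tf tl p)
  set g : List (String × String) → Int :=
    fun p => if pvExact tf tl p then 2 else if pvLastOnly tl p then 1 else 0 with hg
  rw [hmap] at *
  rw [hmap]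
  cases hE : cf.findIdx? (pvExact tf tl) with
  | some k =>
    -- an exact match exists: the maximal score is 2 and its first index is k
    obtain ⟨hk, hfi⟩ := List.findIdx?_eq_some_iff_findIdx_eq.mp hE
    have hpk : pvExact tf tl (cf[k]'hk) = true := by
      have := @List.findIdx_getElem _ (pvExact tf tl) cf (by rw [hfi]; exact hk)
      simpa [hfi] using this
    have h2mem : (2 : Int) ∈ cf.map g := by
      exact List.mem_map.mpr ⟨cf[k]'hk, List.getElem_mem hk, by simp [hg, hpk]⟩
    have hub : ∀ y ∈ cf.map g, y ≤ 2 := by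
      intro y hy; obtain ⟨p, _, rfl⟩ := List.mem_map.mp hy
      simp only [hg]; split_ifs <;> omega
    rw [show PySem.List.maxD (cf.map g) (fun y => y) 0 = ((PySem.List.max? (cf.map g) (fun y => y)).getD 0) from rfl, max?_of_mem_of_ub _ 2 h2mem hub]
    simp only [Option.getD_some]
    rw [PySem.List.index?_eq_idxOf?, List.idxOf?, List.findIdx?_map]
    have : cf.findIdx? (fun p => g p == 2) = some k := by
      rw [findIdx?_congr_mem _ (pvExact tf tl)]
      · exact hE
      · intro p _; simp only [hg]; split_ifs <;> simp_all
    rw [show ((fun x => x == (2 : Int)) ∘ g) = (fun p => g p == (2 : Int)) from rfl, this]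
    simp
  | none =>
    have hEall : ∀ p ∈ cf, pvExact tf tl p = false := List.findIdx?_eq_none_iff.mp hE
    cases hL : cf.findIdx? (pvLastOnly tl) with
    | some k =>
      -- no exact match but a last-name match: the maximal score is 1, first index k
      obtain ⟨hk, hfi⟩ := List.findIdx?_eq_some_iff_findIdx_eq.mp hL
      have hpk : pvLastOnly tl (cf[k]'hk) = true := by
        have := @List.findIdx_getElem _ (pvLastOnly tl) cf (by rw [hfi]; exact hk)
        simpa [hfi] using this
      have h1mem : (1 : Int) ∈ cf.map g := by
        refine List.mem_map.mpr ⟨cf[k]'hk, List.getElem_mem hk, ?_⟩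
        simp [hg, hpk, hEall _ (List.getElem_mem hk)]
      have hub : ∀ y ∈ cf.map g, y ≤ 1 := by
        intro y hy; obtain ⟨p, hp, rfl⟩ := List.mem_map.mp hy
        simp [hg, hEall p hp]; split_ifs <;> omega
      rw [show PySem.List.maxD (cf.map g) (fun y => y) 0 = ((PySem.List.max? (cf.map g) (fun y => y)).getD 0) from rfl, max?_of_mem_of_ub _ 1 h1mem hub]
      simp only [Option.getD_some]
      rw [PySem.List.index?_eq_idxOf?, List.idxOf?, List.findIdx?_map]
      have : cf.findIdx? (fun p => g p == 1) = some k := by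
        rw [findIdx?_congr_mem _ (pvLastOnly tl)]
        · exact hL
        · intro p hp; simp only [hg, hEall p hp]; split_ifs <;> simp_all
      rw [show ((fun x => x == (1 : Int)) ∘ g) = (fun p => g p == (1 : Int)) from rfl, this]
      simp
    | none =>
      -- nothing matches: every score is 0, so best = 0 and B returns none, like A
      have hLall : ∀ p ∈ cf, pvLastOnly tl p = false := List.findIdx?_eq_none_iff.mp hL
      have h0 : ∀ y ∈ cf.map g, y = 0 := by
        intro y hy; obtain ⟨p, hp, rfl⟩ := List.mem_map.mp hy
        simp [hg, hEall p hp, hLall p hp]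
      have hbest : PySem.List.maxD (cf.map g) (fun y => y) 0 = 0 := by
        rw [show PySem.List.maxD (cf.map g) (fun y => y) 0 = ((PySem.List.max? (cf.map g) (fun y => y)).getD 0) from rfl]
        cases hm : PySem.List.max? (cf.map g) (fun y => y) with
        | none => rfl
        | some m => simpa using h0 m (PySem.List.max?_mem hm)
      simp [hbest]
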